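-- pv_equiv track=rewrite | github.com/SahilKhutey/QuantEcosystem | stock-analyzer-pro/ai-engine/news_analyzer.py | map_news_to_stocks
-- ===== SOURCE A (Python) =====
-- from typing import Dict, List, Optional
-- from collections import defaultdict
--
-- def map_news_to_stocks(news_items: List[Dict],
--                       stock_symbols: List[str]) -> Dict:
--     """Map generic news items to specific stock symbols"""
--     stock_news = defaultdict(list)
--
--     for news in news_items:
--         # Direct mentions
--         for symbol in stock_symbols:
--             if symbol in news.get('title', '') or symbol in news.get('description', ''):
--                 stock_news[symbol].append(news)
--
--     return dict(stock_news)
-- ===== SOURCE B (Python) =====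
-- from typing import Dict, List
--
-- def map_news_to_stocks(news_items: List[Dict],
--                        stock_symbols: List[str]) -> Dict:
--     """Map generic news items to specific stock symbols.
--
--     Two-phase re-implementation: first flatten the matches into an ordered
--     (symbol, news) pair list, then group it — key order is the first-match
--     order, values keep news order (with one entry per matching pair)."""
--     pairs = [(symbol, news)
--              for news in news_items
--              for symbol in stock_symbols
--              if symbol in news.get('title', '') or symbol in news.get('description', '')]
--     keys = list(dict.fromkeys(symbol for symbol, _ in pairs))
--     return {k: [news for symbol, news in pairs if symbol == k] for k in keys}
-- ===== Notes on version B (the rewrite author's own statement) =====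
-- stated objective: alternative
-- what changed: A grows a defaultdict in place inside the nested scan; B is a two-phase pipeline: flatten all matches into an ordered (symbol, news) pair list, then build the result by first-occurrence key dedup plus one per-key filter, with no mutable dict during the scan.
import Mathlib
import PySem

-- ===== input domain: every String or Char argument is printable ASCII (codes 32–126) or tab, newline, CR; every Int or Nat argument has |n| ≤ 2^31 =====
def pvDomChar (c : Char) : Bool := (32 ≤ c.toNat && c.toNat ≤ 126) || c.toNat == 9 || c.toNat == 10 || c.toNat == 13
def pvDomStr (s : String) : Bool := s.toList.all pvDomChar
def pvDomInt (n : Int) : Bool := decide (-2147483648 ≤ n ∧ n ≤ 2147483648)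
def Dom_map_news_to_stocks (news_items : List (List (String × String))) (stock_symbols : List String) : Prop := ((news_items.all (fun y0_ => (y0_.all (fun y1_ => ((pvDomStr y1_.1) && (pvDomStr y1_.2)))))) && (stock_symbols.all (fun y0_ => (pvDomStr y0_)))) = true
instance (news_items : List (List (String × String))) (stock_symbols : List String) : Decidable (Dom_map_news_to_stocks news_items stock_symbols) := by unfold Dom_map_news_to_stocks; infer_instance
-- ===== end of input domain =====

-- B replaces A's in-place defaultdict mutation by a two-phase pipeline (flatten matches
-- into an ordered (symbol, news) pair list, then group by first-occurrence keys): alternative decomposition, same cost.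

-- shared condition: symbol in news.get('title','') or symbol in news.get('description','')
def pvMentions (news : List (String × String)) (symbol : String) : Bool :=
  PySem.Str.isIn symbol ((PySem.Dict.mk news).getD "title" "") ||
  PySem.Str.isIn symbol ((PySem.Dict.mk news).getD "description" "")

-- ===== PORT A =====
def map_news_to_stocks (news_items : List (List (String × String))) (stock_symbols : List String) : List (String × List (List (String × String))) :=
  -- stock_news = defaultdict(list); for news …: for symbol …: if symbol in title or symbol in desc: stock_news[symbol].append(news); return dict(stock_news)
  (news_items.foldl (fun stock_news news =>
      stock_symbols.foldl (fun stock_news symbol =>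
        if pvMentions news symbol then
          stock_news.modify symbol [] (· ++ [news])
        else stock_news) stock_news)
    PySem.Dict.empty).items

-- ===== PORT B =====
def map_news_to_stocks_alt (news_items : List (List (String × String))) (stock_symbols : List String) : List (String × List (List (String × String))) :=
  let pairs := news_items.flatMap (fun news =>
    (stock_symbols.filter (fun symbol => pvMentions news symbol)).map (fun symbol => (symbol, news)))
  let keys := PySem.List.dedup (pairs.map (fun p => p.1))
  keys.map (fun k => (k, (pairs.filter (fun p => p.1 == k)).map (fun p => p.2)))

-- ===== PRECONDITION & SPEC =====
def Spec_map_news_to_stocks (news_items : List (List (String × String))) (stock_symbols : List String) (out : List (String × List (List (String × String)))) : Prop := out = map_news_to_stocks_alt news_items stock_symbols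
instance (news_items : List (List (String × String))) (stock_symbols : List String) (out : List (String × List (List (String × String)))) : Decidable (Spec_map_news_to_stocks news_items stock_symbols out) := by unfold Spec_map_news_to_stocks; infer_instance

-- ===== CLAIM (what is proved, stated in full; the proofs are below) =====
def Claim_equal_map_news_to_stocks : Prop := ∀ (news_items : List (List (String × String))) (stock_symbols : List String), Dom_map_news_to_stocks news_items stock_symbols → Spec_map_news_to_stocks news_items stock_symbols (map_news_to_stocks news_items stock_symbols)

-- ===== LEMMAS AND PROOFS =====

-- A's inner loop over the symbols is the grouping step folded over this news item's match pairs.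
theorem pv_inner (news : List (String × String)) :
    ∀ (syms : List String) (d : PySem.Dict String (List (List (String × String)))),
      syms.foldl (fun d symbol =>
        if pvMentions news symbol then d.modify symbol [] (· ++ [news]) else d) d
      = ((syms.filter (fun symbol => pvMentions news symbol)).map (fun symbol => (symbol, news))).foldl
          (fun d p => d.modify p.1 [] (· ++ [p.2])) d := by
  intro syms
  induction syms with
  | nil => intro d; rfl
  | cons s t ih =>
    intro d
    cases hb : pvMentions news s
    · simp [hb, ih]
    · simp [hb, ih]

-- A's outer loop is the grouping step folded over the flattened pair list.
theorem pv_outer (stock_symbols : List String) :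
    ∀ (ns : List (List (String × String))) (d : PySem.Dict String (List (List (String × String)))),
      ns.foldl (fun d news =>
        stock_symbols.foldl (fun d symbol =>
          if pvMentions news symbol then d.modify symbol [] (· ++ [news]) else d) d) d
      = (ns.flatMap (fun news =>
          (stock_symbols.filter (fun symbol => pvMentions news symbol)).map (fun symbol => (symbol, news)))).foldl
          (fun d p => d.modify p.1 [] (· ++ [p.2])) d := by
  intro ns
  induction ns with
  | nil => intro d; rfl
  | cons n t ih =>
    intro d
    simp only [List.foldl_cons, List.flatMap_cons, List.foldl_append]
    rw [pv_inner, ih]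

-- ===== VERDICT (by name: the statement is the Claim_ definition above) =====
theorem map_news_to_stocks_spec : Claim_equal_map_news_to_stocks := by
  intro news_items stock_symbols _
  unfold Spec_map_news_to_stocks map_news_to_stocks map_news_to_stocks_alt
  rw [pv_outer]
  set pairs := news_items.flatMap (fun news =>
    (stock_symbols.filter (fun symbol => pvMentions news symbol)).map (fun symbol => (symbol, news))) with hp
  have hnd : (pairs.foldl (fun d p => d.modify p.1 [] (· ++ [p.2])) PySem.Dict.empty).keys.Nodup := by
    exact PySem.Dict.nodup_keys_foldl_modify_key pairs (fun p => p.1) [] (fun _ p => (· ++ [p.2])) _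
      PySem.Dict.nodup_keys_empty
  rw [PySem.Dict.items_eq_map_keys _ hnd []]
  have hk : (pairs.foldl (fun d p => d.modify p.1 [] (· ++ [p.2])) PySem.Dict.empty).keys
      = PySem.List.dedup (pairs.map (fun p => p.1)) := by
    rw [PySem.Dict.keys_foldl_modify_key]
    simp [PySem.Dict.keys_empty, PySem.Set.update_nil_left, PySem.List.dedup_eq_ofList]
  rw [hk]
  refine List.map_congr_left ?_
  intro k _
  congr 1
  rw [PySem.Dict.getD_foldl_modify_append]
  simp [PySem.Dict.getD_empty]
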